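-- pv_equiv track=rewrite | github.com/Sandia-OpenSHMEM/SOS | scripts/generate_manpages.py | generateRoutineList
-- ===== SOURCE A (Python) =====
-- def generateRoutineList(TOC):
--     """
--     Takes the Table of Contents and compiles a list of all function names
--     that needs to be parsed to manpages. The code assumes that every function
--     entry will be preceded by the macro, "\\subsubsection{\\textbf"
--     """
--
--     count = 0;
--     routineList = []
--     while(TOC.find("\\subsubsection{\\textbf", count) > 0):
--         currIdx = TOC.find("\\subsubsection{\\textbf", count)
--         startBrace = TOC.find("\\textbf", currIdx) + len("\\textbf")
--         endBrace = TOC.find("}", startBrace)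
--         func = TOC[startBrace+1:endBrace]
--         if (func.find(",") != -1):
--             func = func[:func.find(",")]
--         name = func.lower().replace("\\", "")
--         routineList.append(name)
--         count = currIdx + len("\\subsubsection{\\textbf")
--     return routineList
-- ===== SOURCE B (Python) =====
-- MARKER = "\\subsubsection{\\textbf"
--
--
-- def _entryName(seg):
--     """seg starts right after the MARKER; read the brace-delimited entry."""
--     entry = seg[1:seg.find("}")]
--     comma = entry.find(",")
--     if comma != -1:
--         entry = entry[:comma]
--     return entry.lower().replace("\\", "")
--
--
-- def generateRoutineList(TOC):
--     """Consume the string suffix-by-suffix: cut it after each marker and read the entry there."""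
--     names = []
--     tail = TOC
--     while True:
--         i = tail.find(MARKER)
--         if i == -1:
--             return names
--         seg = tail[i + len(MARKER):]
--         names.append(_entryName(seg))
--         tail = seg
-- ===== Notes on version B (the rewrite author's own statement) =====
-- stated objective: simpler
-- what changed: B consumes the string suffix-by-suffix, cutting the processed prefix off after each marker with a single marker search per iteration, instead of A's absolute-index cursor loop that re-runs three searches per iteration; B also processes a marker at position zero, which A's positive-index loop guard silently drops.
-- intended difference: On TOCs whose very first character starts a marker occurrence, A's positive-index loop guard fails immediately and A returns the empty list, dropping every entry; B returns the full list of entry names, the intended value, since an entry at position zero is a legitimate entry. — e.g. on generateRoutineList("\\subsubsection{\\textbf{A}"): A returns [], B returns ["a"]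
import Mathlib
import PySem

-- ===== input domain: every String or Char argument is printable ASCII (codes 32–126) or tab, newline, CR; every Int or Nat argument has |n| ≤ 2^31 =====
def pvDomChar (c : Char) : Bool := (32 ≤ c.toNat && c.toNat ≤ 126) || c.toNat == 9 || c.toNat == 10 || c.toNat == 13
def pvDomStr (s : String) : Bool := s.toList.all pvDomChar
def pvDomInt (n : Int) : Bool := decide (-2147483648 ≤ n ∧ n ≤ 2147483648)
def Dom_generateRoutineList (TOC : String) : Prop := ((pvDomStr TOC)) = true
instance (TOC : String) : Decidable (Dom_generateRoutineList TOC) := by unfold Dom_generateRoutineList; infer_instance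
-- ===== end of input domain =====

-- B consumes the string suffix-by-suffix (one marker search per iteration) instead of A's
-- absolute-index cursor loop with repeated searches; objective: simpler. B also processes a
-- marker at position zero, which A's positive-index loop guard silently drops (see D_ below).

def pvMark : String := "\\subsubsection{\\textbf"

-- ===== PORT A =====
-- fuel only makes the while-loop total; TOC.toList.length + 1 steps always suffice
-- (each iteration advances 'count' by at least 22)
def genLoopA (TOC : String) : Nat → Nat → List String → List String
  | 0, _, acc => acc
  | fuel+1, count, acc =>
    if PySem.Str.findFrom TOC pvMark (count : Int) none > 0 then
      let currIdx : Int := PySem.Str.findFrom TOC pvMark (count : Int) none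
      let startBrace : Int := PySem.Str.findFrom TOC "\\textbf" currIdx none + 7
      let endBrace : Int := PySem.Str.findFrom TOC "}" startBrace none
      let func := PySem.Str.slice TOC (some (startBrace + 1)) (some endBrace)
      let func2 := if PySem.Str.find func "," ≠ -1
        then PySem.Str.slice func none (some (PySem.Str.find func ","))
        else func
      let name := PySem.Str.replace (PySem.Str.lower func2) "\\" ""
      genLoopA TOC fuel (currIdx.toNat + 22) (acc ++ [name])
    else acc

def generateRoutineList (TOC : String) : List String :=
  genLoopA TOC (TOC.toList.length + 1) 0 []

-- ===== PORT B =====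
def pvEntryName (seg : String) : String :=
  let entry := PySem.Str.slice seg (some 1) (some (PySem.Str.find seg "}"))
  let comma := PySem.Str.find entry ","
  let entry2 := if comma ≠ -1 then PySem.Str.slice entry none (some comma) else entry
  PySem.Str.replace (PySem.Str.lower entry2) "\\" ""

-- fuel only makes the while-loop total; each step drops at least 22 characters from 'tail'
def genLoopB : Nat → String → List String → List String
  | 0, _, names => names
  | fuel+1, tail, names =>
    let i := PySem.Str.find tail pvMark
    if i = -1 then names
    else
      let seg := PySem.Str.slice tail (some (i + 22)) none
      genLoopB fuel seg (names ++ [pvEntryName seg])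

def generateRoutineList_alt (TOC : String) : List String :=
  genLoopB (TOC.toList.length + 1) TOC []

-- ===== PRECONDITION & SPEC =====
-- On TOCs that START with the marker, A's positive-index loop guard stops at once and A returns
-- the empty list, dropping every entry; B returns the full list of entries, the intended value.
def D_generateRoutineList (TOC : String) : Prop := PySem.Str.startswith TOC pvMark = true
instance (TOC : String) : Decidable (D_generateRoutineList TOC) := by
  unfold D_generateRoutineList; infer_instance

def Spec_generateRoutineList (TOC : String) (out : List String) : Prop :=
  ¬ D_generateRoutineList TOC → out = generateRoutineList_alt TOC
instance (TOC : String) (out : List String) : Decidable (Spec_generateRoutineList TOC out) := by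
  unfold Spec_generateRoutineList; infer_instance

def pvDiffWitness_generateRoutineList : String := "\\subsubsection{\\textbf{A}"
def pvDiffWitnessOut_generateRoutineList : (List String) × (List String) := ([], ["a"])

-- ===== CLAIM (what is proved, stated in full; the proofs are below) =====
def Claim_unchanged_generateRoutineList : Prop :=
  ∀ (TOC : String), Dom_generateRoutineList TOC →
    Spec_generateRoutineList TOC (generateRoutineList TOC)
def Claim_changed_generateRoutineList : Prop :=
  Dom_generateRoutineList (pvDiffWitness_generateRoutineList) ∧
  D_generateRoutineList (pvDiffWitness_generateRoutineList) ∧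
  generateRoutineList (pvDiffWitness_generateRoutineList) = pvDiffWitnessOut_generateRoutineList.1 ∧
  generateRoutineList_alt (pvDiffWitness_generateRoutineList) = pvDiffWitnessOut_generateRoutineList.2 ∧
  pvDiffWitnessOut_generateRoutineList.1 ≠ pvDiffWitnessOut_generateRoutineList.2
def Claim_exact_generateRoutineList : Prop :=
  ∀ (TOC : String), Dom_generateRoutineList TOC → D_generateRoutineList TOC →
    generateRoutineList TOC ≠ generateRoutineList_alt TOC

-- ===== LEMMAS AND PROOFS =====

theorem pv_str_ext {s t : String} (h : s.toList = t.toList) : s = t := by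
  have := congrArg String.ofList h; simpa using this

-- find points at n when an occurrence is at n and none earlier
theorem pv_find_eq_of {s sub : List Char} {n : Nat}
    (h0 : sub <+: s.drop n) (hmin : ∀ i < n, ¬ sub <+: s.drop i) :
    PySem.Chars.find s sub = n := by
  have hnn : 0 ≤ PySem.Chars.find s sub := by
    rw [PySem.Chars.find_nonneg_iff, ← PySem.Chars.isIn_iff_infix,
      ← PySem.Chars.exists_prefix_drop_iff_isIn]
    exact ⟨n, h0⟩
  obtain ⟨hp, hm⟩ := PySem.Chars.find_spec hnn
  have h1 : ¬ (PySem.Chars.find s sub).toNat < n := fun hlt => hmin _ hlt hp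
  have h2 : ¬ n < (PySem.Chars.find s sub).toNat := fun hlt => hm _ hlt h0
  omega

theorem pv_find_of_prefix {s sub : List Char} (h : sub <+: s) :
    PySem.Chars.find s sub = 0 := by
  have := pv_find_eq_of (n := 0) (by simpa using h) (by omega)
  simpa using this

-- in a string that begins with the marker, the first "\textbf" is at offset 15
theorem pv_find_textbf {s : List Char} (h : pvMark.toList <+: s) :
    PySem.Chars.find s "\\textbf".toList = 15 := by
  obtain ⟨t, ht⟩ := h
  subst ht
  have h0 : "\\textbf".toList <+: (pvMark.toList ++ t).drop 15 := by
    rw [List.drop_append_of_le_length (by decide)]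
    have : pvMark.toList.drop 15 = "\\textbf".toList := by decide
    rw [this]
    exact List.prefix_append _ _
  have hmin : ∀ i < 15, ¬ "\\textbf".toList <+: (pvMark.toList ++ t).drop i := by
    intro i hi
    have hlen : pvMark.toList.length = 22 := by decide
    have h7 : ("\\textbf".toList).length = 7 := by decide
    rw [List.drop_append_of_le_length (by rw [hlen]; omega),
      List.isPrefix_append_of_length (by rw [h7, List.length_drop, hlen]; omega)]
    interval_cases i <;> decide
  have := pv_find_eq_of (n := 15) h0 hmin
  simpa using this

theorem pv_dropLast_drop (l : List Char) (n : Nat) :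
    (l.drop n).dropLast = l.dropLast.drop n := by
  rw [List.dropLast_eq_take, List.dropLast_eq_take, List.drop_take, List.length_drop]
  congr 1
  omega

theorem pv_slice_neg_one (xs : List Char) (a : Nat) :
    PySem.List.slice xs (some (a : Int)) (some (-1)) = xs.dropLast.drop a := by
  simp [PySem.List.slice]
  rcases le_or_gt a xs.length with h | h
  · rw [min_eq_left h, List.dropLast_eq_take, List.drop_take]
  · rw [min_eq_right (le_of_lt h), List.drop_eq_nil_of_le (by simp)]
    rw [List.drop_eq_nil_of_le (by simp [List.length_dropLast]; omega), List.take_nil]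

theorem genLoopB_length (fuel : Nat) : ∀ (tail : String) (acc : List String),
    acc.length ≤ (genLoopB fuel tail acc).length := by
  induction fuel with
  | zero => intro tail acc; simp [genLoopB]
  | succ n ih =>
    intro tail acc
    simp only [genLoopB]
    split
    · exact le_refl _
    · calc acc.length ≤ (acc ++ [pvEntryName _]).length := by simp
        _ ≤ _ := ih _ _

theorem pv_slice_one_natCast (xs : List Char) (b : Nat) :
    PySem.List.slice xs (some 1) (some (b : Int)) = (xs.drop 1).take (b - 1) := by
  have := PySem.List.slice_natCast xs 1 b
  simpa using this

theorem pv_slice_one_neg_one (xs : List Char) :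
    PySem.List.slice xs (some 1) (some (-1)) = xs.dropLast.drop 1 := by
  have := pv_slice_neg_one xs 1
  simpa using this

theorem pv_entry_eq (func entry : String) (h : func.toList = entry.toList) :
    PySem.Str.replace (PySem.Str.lower (if PySem.Str.find func "," ≠ -1
      then PySem.Str.slice func none (some (PySem.Str.find func ",")) else func)) "\\" "" =
    PySem.Str.replace (PySem.Str.lower (if PySem.Str.find entry "," ≠ -1
      then PySem.Str.slice entry none (some (PySem.Str.find entry ",")) else entry)) "\\" "" := by
  have hf : PySem.Str.find func "," = PySem.Str.find entry "," := by
    rw [PySem.Str.find_eq, PySem.Str.find_eq, h]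
  have hinner : (if PySem.Str.find func "," ≠ -1
      then PySem.Str.slice func none (some (PySem.Str.find func ",")) else func).toList =
      (if PySem.Str.find entry "," ≠ -1
      then PySem.Str.slice entry none (some (PySem.Str.find entry ",")) else entry).toList := by
    rw [hf]
    split_ifs
    · rw [PySem.Str.toList_slice, PySem.Str.toList_slice, h]
    · exact h
  apply pv_str_ext
  rw [PySem.Str.toList_replace, PySem.Str.toList_replace, PySem.Str.toList_lower,
    PySem.Str.toList_lower, hinner]

theorem genLoopA_succ (TOC : String) (fuel count : Nat) (acc : List String) :
    genLoopA TOC (fuel+1) count acc =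
    (if PySem.Str.findFrom TOC pvMark (count : Int) none > 0 then
      let currIdx : Int := PySem.Str.findFrom TOC pvMark (count : Int) none
      let startBrace : Int := PySem.Str.findFrom TOC "\\textbf" currIdx none + 7
      let endBrace : Int := PySem.Str.findFrom TOC "}" startBrace none
      let func := PySem.Str.slice TOC (some (startBrace + 1)) (some endBrace)
      let func2 := if PySem.Str.find func "," ≠ -1
        then PySem.Str.slice func none (some (PySem.Str.find func ","))
        else func
      let name := PySem.Str.replace (PySem.Str.lower func2) "\\" ""
      genLoopA TOC fuel (currIdx.toNat + 22) (acc ++ [name])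
    else acc) := rfl

theorem genLoopB_succ (fuel : Nat) (tail : String) (names : List String) :
    genLoopB (fuel+1) tail names =
    (if PySem.Str.find tail pvMark = -1 then names
    else
      let seg := PySem.Str.slice tail (some (PySem.Str.find tail pvMark + 22)) none
      genLoopB fuel seg (names ++ [pvEntryName seg])) := by
  simp only [genLoopB]

theorem pv_loop_eq (TOC : String) : ∀ (fA fB count : Nat) (tail : String) (acc : List String),
    tail.toList = TOC.toList.drop count →
    count ≤ TOC.toList.length →
    (count = 0 → ¬ pvMark.toList <+: TOC.toList) →
    TOC.toList.length + 1 ≤ fA + count →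
    TOC.toList.length + 1 ≤ fB + count →
    genLoopA TOC fA count acc = genLoopB fB tail acc := by
  intro fA
  induction fA with
  | zero => intro fB count tail acc ht hc h0 hfA hfB; omega
  | succ fA ih =>
    intro fB count tail acc ht hc h0 hfA hfB
    obtain ⟨fB', rfl⟩ : ∃ k, fB = k + 1 := ⟨fB - 1, by omega⟩
    have hfindB : PySem.Str.find tail pvMark
        = PySem.Chars.find (TOC.toList.drop count) pvMark.toList := by
      rw [PySem.Str.find_eq, ht]
    by_cases hneg : PySem.Chars.find (TOC.toList.drop count) pvMark.toList = -1
    · have hfindA : PySem.Str.findFrom TOC pvMark (count : Int) none = -1 := by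
        rw [PySem.Str.findFrom_eq, PySem.Chars.findFrom_natCast _ _ count hc, if_pos hneg]
      rw [genLoopA_succ, genLoopB_succ, hfindA, hfindB, if_neg (by norm_num), if_pos hneg]
    · -- the marker occurs at offset iN of the suffix
      have hile := PySem.Chars.neg_one_le_find (TOC.toList.drop count) pvMark.toList
      have hi0 : 0 ≤ PySem.Chars.find (TOC.toList.drop count) pvMark.toList := by omega
      rcases Int.eq_ofNat_of_zero_le hi0 with ⟨iN, hiN⟩
      have hpref : pvMark.toList <+: TOC.toList.drop (count + iN) := by
        have hsp := (PySem.Chars.find_spec hi0).1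
        rw [hiN] at hsp
        simpa [List.drop_drop] using hsp
      have hmlen : pvMark.toList.length = 22 := by decide
      have hlen22 : count + iN + 22 ≤ TOC.toList.length := by
        have := hpref.length_le
        rw [List.length_drop, hmlen] at this
        omega
      have hpos : 0 < count + iN := by
        rcases Nat.eq_zero_or_pos count with hc0 | hcp
        · rcases Nat.eq_zero_or_pos iN with hi0' | hip
          · exfalso
            apply h0 hc0
            have := hpref
            rw [hc0, hi0'] at this
            simpa using this
          · omega
        · omega
      have hfindA : PySem.Str.findFrom TOC pvMark (count : Int) none = ((count + iN : Nat) : Int) := by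
        rw [PySem.Str.findFrom_eq, PySem.Chars.findFrom_natCast _ _ count hc, if_neg hneg, hiN]
        push_cast; ring
      have htb : PySem.Str.findFrom TOC "\\textbf" ((count + iN : Nat) : Int) none
          = ((count + iN : Nat) : Int) + 15 := by
        rw [PySem.Str.findFrom_eq, PySem.Chars.findFrom_natCast _ _ (count + iN) (by omega),
          pv_find_textbf hpref]
        norm_num
      have hrb : PySem.Str.findFrom TOC "}" (((count + iN : Nat) : Int) + 15 + 7) none
          = if PySem.Chars.find (TOC.toList.drop (count + iN + 22)) "}".toList = -1 then -1
            else ((count + iN + 22 : Nat) : Int)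
              + PySem.Chars.find (TOC.toList.drop (count + iN + 22)) "}".toList := by
        have hcast : ((count + iN : Nat) : Int) + 15 + 7 = ((count + iN + 22 : Nat) : Int) := by
          push_cast; ring
        rw [hcast, PySem.Str.findFrom_eq,
          PySem.Chars.findFrom_natCast _ _ (count + iN + 22) (by omega)]
      -- B's new suffix
      have hseg : (PySem.Str.slice tail (some (((iN : Nat) : Int) + 22)) none).toList
          = TOC.toList.drop (count + iN + 22) := by
        rw [PySem.Str.toList_slice, PySem.Chars.slice_eq_listSlice, ht]
        have hcast : ((iN : Nat) : Int) + 22 = ((iN + 22 : Nat) : Int) := by push_cast; ring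
        rw [hcast, PySem.List.slice_from (List.drop count TOC.toList) (Int.natCast_nonneg (iN + 22))]
        rw [Int.toNat_natCast, List.drop_drop, Nat.add_assoc]
      -- the extracted entries agree
      have hfunc : (PySem.Str.slice TOC (some (((count + iN : Nat) : Int) + 15 + 7 + 1))
            (some (PySem.Str.findFrom TOC "}" (((count + iN : Nat) : Int) + 15 + 7) none))).toList
          = (PySem.Str.slice (PySem.Str.slice tail (some (((iN : Nat) : Int) + 22)) none)
              (some 1) (some (PySem.Str.find
                (PySem.Str.slice tail (some (((iN : Nat) : Int) + 22)) none) "}"))).toList := by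
        rw [PySem.Str.toList_slice, PySem.Chars.slice_eq_listSlice,
          PySem.Str.toList_slice, PySem.Chars.slice_eq_listSlice, hseg,
          PySem.Str.find_eq, hseg, hrb]
        by_cases hj : PySem.Chars.find (TOC.toList.drop (count + iN + 22)) "}".toList = -1
        · rw [if_pos hj, hj]
          have hc1 : ((count + iN : Nat) : Int) + 15 + 7 + 1 = ((count + iN + 23 : Nat) : Int) := by
            push_cast; ring
          rw [hc1, pv_slice_neg_one, pv_slice_one_neg_one, pv_dropLast_drop, List.drop_drop]
        · rw [if_neg hj]
          have hjle := PySem.Chars.neg_one_le_find (TOC.toList.drop (count + iN + 22)) "}".toList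
          have hj0 : 0 ≤ PySem.Chars.find (TOC.toList.drop (count + iN + 22)) "}".toList := by omega
          rcases Int.eq_ofNat_of_zero_le hj0 with ⟨jN, hjN⟩
          rw [hjN]
          have hc1 : ((count + iN : Nat) : Int) + 15 + 7 + 1 = ((count + iN + 23 : Nat) : Int) := by
            push_cast; ring
          have hc2 : ((count + iN + 22 : Nat) : Int) + ((jN : Nat) : Int)
              = ((count + iN + 22 + jN : Nat) : Int) := by push_cast; ring
          rw [hc1, hc2, PySem.List.slice_natCast, pv_slice_one_natCast, List.drop_drop]
          have hsub : count + iN + 22 + jN - (count + iN + 23) = jN - 1 := by omega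
          rw [hsub]
      -- unfold one step of each loop
      have hcond : PySem.Str.findFrom TOC pvMark (count : Int) none > 0 := by
        rw [hfindA]; exact_mod_cast hpos
      have hcondB : ¬ PySem.Str.find tail pvMark = -1 := by rw [hfindB]; exact hneg
      rw [genLoopA_succ, genLoopB_succ, if_pos hcond, if_neg hcondB]
      simp only [hfindA, hfindB, hiN, htb, Int.toNat_natCast]
      have hname : PySem.Str.replace (PySem.Str.lower (if PySem.Str.find
            (PySem.Str.slice TOC (some (((count + iN : Nat) : Int) + 15 + 7 + 1))
              (some (PySem.Str.findFrom TOC "}" (((count + iN : Nat) : Int) + 15 + 7) none))) ","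
            ≠ -1 then PySem.Str.slice (PySem.Str.slice TOC (some (((count + iN : Nat) : Int) + 15 + 7 + 1))
              (some (PySem.Str.findFrom TOC "}" (((count + iN : Nat) : Int) + 15 + 7) none))) none
              (some (PySem.Str.find (PySem.Str.slice TOC (some (((count + iN : Nat) : Int) + 15 + 7 + 1))
              (some (PySem.Str.findFrom TOC "}" (((count + iN : Nat) : Int) + 15 + 7) none))) ","))
            else PySem.Str.slice TOC (some (((count + iN : Nat) : Int) + 15 + 7 + 1))
              (some (PySem.Str.findFrom TOC "}" (((count + iN : Nat) : Int) + 15 + 7) none)))) "\\" ""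
          = pvEntryName (PySem.Str.slice tail (some (((iN : Nat) : Int) + 22)) none) := by
        unfold pvEntryName
        exact pv_entry_eq _ _ hfunc
      rw [hname]
      exact ih fB' (count + iN + 22) _ (acc ++ [_]) hseg (by omega) (by omega) (by omega) (by omega)

-- ===== VERDICT (by name: the statement is the Claim_ definition above) =====
theorem generateRoutineList_spec : Claim_unchanged_generateRoutineList := by
  intro TOC _ hD
  unfold generateRoutineList generateRoutineList_alt
  apply pv_loop_eq TOC (TOC.toList.length + 1) (TOC.toList.length + 1) 0 TOC []
  · simp
  · exact Nat.zero_le _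
  · intro _ hp
    apply hD
    unfold D_generateRoutineList
    rw [PySem.Str.startswith_eq]
    exact (PySem.Chars.startswith_iff _ _).mpr hp
  · omega
  · omega

theorem generateRoutineList_changed : Claim_changed_generateRoutineList := by
  unfold Claim_changed_generateRoutineList; decide

theorem generateRoutineList_tight : Claim_exact_generateRoutineList := by
  intro TOC _ hD
  have hp : pvMark.toList <+: TOC.toList := by
    unfold D_generateRoutineList at hD
    rw [PySem.Str.startswith_eq] at hD
    exact (PySem.Chars.startswith_iff _ _).mp hD
  have hfind0 : PySem.Chars.find TOC.toList pvMark.toList = 0 := pv_find_of_prefix hp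
  have hA : generateRoutineList TOC = [] := by
    unfold generateRoutineList
    rw [genLoopA_succ]
    have h0 : PySem.Str.findFrom TOC pvMark ((0 : Nat) : Int) none = 0 := by
      rw [PySem.Str.findFrom_eq]
      norm_num [PySem.Chars.findFrom_zero, hfind0]
    rw [if_neg (by rw [h0]; norm_num)]
  have hB : generateRoutineList_alt TOC ≠ [] := by
    unfold generateRoutineList_alt
    rw [genLoopB_succ]
    have hf : PySem.Str.find TOC pvMark = 0 := by rw [PySem.Str.find_eq, hfind0]
    rw [if_neg (by rw [hf]; norm_num)]
    intro hcontra
    have hlen := genLoopB_length TOC.toList.length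
      (PySem.Str.slice TOC (some (PySem.Str.find TOC pvMark + 22)) none)
      ([] ++ [pvEntryName (PySem.Str.slice TOC (some (PySem.Str.find TOC pvMark + 22)) none)])
    rw [hcontra] at hlen
    simp at hlen
  rw [hA]
  intro h
  exact hB h.symm
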